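-- pv_equiv track=rewrite | github.com/whyj107/Algorithm | CodeWar/20210108_Tally it up.py | score_to_tally
-- ===== SOURCE A (Python) =====
-- def score_to_tally(score):
--     dic = {1: 'a', 2: 'b', 3: 'c', 4: 'd', 5: 'e'}
--     answer = []
--     idx = 5
--     while score > 0:
--         if score >= idx:
--             score -= idx
--             answer.append(dic[idx])
--         else:
--             idx -= 1
--     return ' <br>'.join(answer) + (" <br>" if answer[-1] == 'e' else "")
-- ===== SOURCE B (Python) =====
-- def score_to_tally(score):
--     if score <= 0:
--         return ""
--     q, r = divmod(score, 5)
--     return 'e <br>' * q + ('abcd'[r - 1] if r else '')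
-- ===== Notes on version B (the rewrite author's own statement) =====
-- stated objective: simpler
-- what changed: Replaces the greedy while-loop that repeatedly decrements score and idx with a closed-form divmod: score//5 copies of 'e <br>' plus the letter for score%5, with no loop over the score.
import Mathlib
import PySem

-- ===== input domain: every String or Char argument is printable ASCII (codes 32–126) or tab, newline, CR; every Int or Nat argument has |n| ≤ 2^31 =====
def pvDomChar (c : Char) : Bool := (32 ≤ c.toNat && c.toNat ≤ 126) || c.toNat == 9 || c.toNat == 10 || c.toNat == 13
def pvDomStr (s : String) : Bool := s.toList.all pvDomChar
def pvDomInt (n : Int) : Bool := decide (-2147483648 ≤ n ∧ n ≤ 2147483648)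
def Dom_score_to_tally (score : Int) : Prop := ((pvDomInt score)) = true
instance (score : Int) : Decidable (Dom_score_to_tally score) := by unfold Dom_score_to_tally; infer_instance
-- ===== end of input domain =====

-- B replaces A's greedy decrement loop by direct division (score // 5 copies of 'e'
-- plus the letter for score % 5), joined in closed form: simpler and loop-free.

-- ===== PORT A =====
def tallyDic : PySem.Dict Int String :=
  PySem.Dict.ofList [(1, "a"), (2, "b"), (3, "c"), (4, "d"), (5, "e")]

-- the while loop; fuel ≥ score.toNat + 6 is always enough (a totality guard only)
def tallyLoop : Nat → Int → Int → List String → List String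
  | 0, _, _, ans => ans
  | f + 1, score, idx, ans =>
    if score > 0 then
      if score ≥ idx then
        tallyLoop f (score - idx) idx (ans ++ [tallyDic.getD idx ""])
      else
        tallyLoop f score (idx - 1) ans
    else ans

def score_to_tally (score : Int) : String :=
  let answer := tallyLoop (score.toNat + 6) score 5 []
  PySem.Str.join " <br>" answer ++
    (if PySem.List.pyGet? answer (-1) = some "e" then " <br>" else "")

-- ===== PORT B =====
-- 'e <br>' * q
def repStr : Nat → String → String
  | 0, _ => ""
  | n + 1, s => s ++ repStr n s

def score_to_tally_alt (score : Int) : String :=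
  if score ≤ 0 then ""
  else
    let q := PySem.Int.floordiv score 5
    let r := PySem.Int.mod score 5
    repStr q.toNat "e <br>" ++
      (if r = 0 then ""
       else (((PySem.Str.pyGet? "abcd" (r - 1)).map (fun c => String.ofList [c])).getD ""))

-- ===== PRECONDITION & SPEC =====
-- Pre_ excludes score ≤ 0: there A's answer list is empty and answer[-1] raises IndexError
-- (B returns "" on those inputs, but A returns no value to match).
def Pre_score_to_tally (score : Int) : Prop := 0 < score
instance (score : Int) : Decidable (Pre_score_to_tally score) := by
  unfold Pre_score_to_tally; infer_instance
def pvWitness_score_to_tally : Int := (7)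

def Spec_score_to_tally (score : Int) (out : String) : Prop := out = score_to_tally_alt score
instance (score : Int) (out : String) : Decidable (Spec_score_to_tally score out) := by
  unfold Spec_score_to_tally; infer_instance

-- ===== CLAIM (what is proved, stated in full; the proofs are below) =====
def Claim_equal_score_to_tally : Prop := ∀ (score : Int), Dom_score_to_tally score → Pre_score_to_tally score → Spec_score_to_tally score (score_to_tally score)

-- ===== LEMMAS AND PROOFS =====

-- the letter A appends for a remainder r ∈ {1,2,3,4}
def tallyLetter (r : Int) : String := tallyDic.getD r ""

-- the list A's loop builds, in closed form
def tallyList (s : Int) : List String :=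
  List.replicate (PySem.Int.floordiv s 5).toNat "e" ++
    (if PySem.Int.mod s 5 = 0 then [] else [tallyLetter (PySem.Int.mod s 5)])

theorem tallyLoop_spec : ∀ n (s : Int), s.toNat = n → 0 < s →
    ∀ fuel ans, s.toNat + 5 ≤ fuel → tallyLoop fuel s 5 ans = ans ++ tallyList s := by
  intro n
  induction n using Nat.strong_induction_on with
  | _ n ih =>
    intro s hn hs fuel ans hfuel
    have he : tallyDic.getD 5 "" = "e" := by decide
    by_cases h5 : 5 ≤ s
    · -- one 'e' step
      obtain ⟨f, rfl⟩ : ∃ f, fuel = f + 1 := ⟨fuel - 1, by omega⟩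
      have hstep : tallyLoop (f + 1) s 5 ans
          = tallyLoop f (s - 5) 5 (ans ++ ["e"]) := by
        have h1 : s > 0 := hs
        have h2 : s ≥ 5 := h5
        simp [tallyLoop, h1, h2, he]
      rw [hstep]
      by_cases hs5 : s = 5
      · subst hs5
        obtain ⟨g, rfl⟩ : ∃ g, f = g + 1 := ⟨f - 1, by omega⟩
        simp [tallyLoop, tallyList]
      · have hrec := ih (s - 5).toNat (by omega) (s - 5) rfl (by omega) f (ans ++ ["e"]) (by omega)
        rw [hrec]
        have hq : (PySem.Int.floordiv s 5).toNat = (PySem.Int.floordiv (s - 5) 5).toNat + 1 := by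
          rw [PySem.Int.floordiv_eq_ediv_of_pos (by omega), PySem.Int.floordiv_eq_ediv_of_pos (by omega)]
          omega
        have hr : PySem.Int.mod s 5 = PySem.Int.mod (s - 5) 5 := by
          rw [PySem.Int.mod_eq_emod_of_pos (by omega), PySem.Int.mod_eq_emod_of_pos (by omega)]
          omega
        simp only [tallyList, hq, hr, List.replicate_succ, List.append_assoc,
          List.cons_append, List.nil_append]
    · -- 0 < s < 5 : interval cases
      have h1 : 1 ≤ s := hs
      have h4 : s ≤ 4 := by omega
      have hq : PySem.Int.floordiv s 5 = 0 := by
        rw [PySem.Int.floordiv_eq_ediv_of_pos (by omega)]; omega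
      have hr : PySem.Int.mod s 5 = s := by
        rw [PySem.Int.mod_eq_emod_of_pos (by omega)]; omega
      obtain ⟨f, rfl⟩ : ∃ f, fuel = f + 6 := ⟨fuel - 6, by omega⟩
      interval_cases s <;>
        simp [tallyLoop, tallyList, tallyLetter, tallyDic, PySem.Dict.getD]

-- intercalate over a nonempty tail peels one block
theorem inter_cons {α : Type} (sep x : List α) (ys : List (List α)) (h : ys ≠ []) :
    List.intercalate sep (x :: ys) = x ++ sep ++ List.intercalate sep ys := by
  cases ys with
  | nil => exact absurd rfl h
  | cons y zs =>
    simp [List.intercalate, List.intersperse, List.append_assoc]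

theorem ic_rep {α : Type} (sep x : List α) :
    ∀ q, List.intercalate sep (List.replicate (q + 1) x) ++ sep
      = (List.replicate (q + 1) (x ++ sep)).flatten := by
  intro q
  induction q with
  | zero => simp [List.intercalate]
  | succ k ih =>
    rw [List.replicate_succ, inter_cons sep x _ (by simp), List.append_assoc (x ++ sep), ih]
    simp [List.replicate_succ]

theorem ic_last {α : Type} (sep x y : List α) :
    ∀ q, List.intercalate sep (List.replicate q x ++ [y])
      = (List.replicate q (x ++ sep)).flatten ++ y := by
  intro q
  induction q with
  | zero => simp [List.intercalate]
  | succ k ih =>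
    rw [List.replicate_succ, List.cons_append,
      inter_cons sep x _ (by rcases k with _ | k <;> simp), ih]
    simp [List.replicate_succ]

-- string bridge: repStr at the character level
theorem toList_repStr (n : Nat) (s : String) :
    (repStr n s).toList = (List.replicate n s.toList).flatten := by
  induction n with
  | zero => simp [repStr]
  | succ k ih => simp [repStr, List.replicate_succ, ih]

-- join " <br>" (replicate (q+1) "e") ++ " <br>" = "e <br>" * (q+1), char level
theorem join_replicate_e (q : Nat) :
    (PySem.Str.join " <br>" (List.replicate (q + 1) "e")).toList ++ " <br>".toList
      = (List.replicate (q + 1) "e <br>".toList).flatten := by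
  have h := ic_rep [' ', '<', 'b', 'r', '>'] ['e'] q
  simp only [List.cons_append, List.nil_append] at h
  simp [PySem.Str.join, PySem.Chars.join]
  exact h

-- join " <br>" (replicate q "e" ++ [x]) = "e <br>" * q ++ x, char level
theorem join_replicate_e_last (q : Nat) (x : String) :
    (PySem.Str.join " <br>" (List.replicate q "e" ++ [x])).toList
      = (List.replicate q "e <br>".toList).flatten ++ x.toList := by
  have h := ic_last [' ', '<', 'b', 'r', '>'] ['e'] x.toList q
  simp only [List.cons_append, List.nil_append] at h
  simp [PySem.Str.join, PySem.Chars.join]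
  exact h

-- ===== VERDICT (by name: the statement is the Claim_ definition above) =====
theorem score_to_tally_spec : Claim_equal_score_to_tally := by
  intro score _ hpre
  unfold Spec_score_to_tally
  simp only [score_to_tally, score_to_tally_alt]
  have hpre' : 0 < score := hpre
  have hloop := tallyLoop_spec score.toNat score rfl hpre' (score.toNat + 6) [] (by omega)
  rw [hloop, List.nil_append, if_neg (by omega : ¬ score ≤ 0)]
  have hq0 : 0 ≤ PySem.Int.floordiv score 5 := by
    rw [PySem.Int.floordiv_eq_ediv_of_pos (by omega)]; omega
  have hrlo : 0 ≤ PySem.Int.mod score 5 := by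
    rw [PySem.Int.mod_eq_emod_of_pos (by omega)]; omega
  have hrhi : PySem.Int.mod score 5 < 5 := by
    rw [PySem.Int.mod_eq_emod_of_pos (by omega)]; omega
  have hdm := PySem.Int.floordiv_mul_add_mod score 5
  by_cases hr : PySem.Int.mod score 5 = 0
  · -- answer = replicate q "e" with q ≥ 1; trailing " <br>" on both sides
    have hq1 : 1 ≤ PySem.Int.floordiv score 5 := by omega
    obtain ⟨k, hk⟩ : ∃ k, (PySem.Int.floordiv score 5).toNat = k + 1 :=
      ⟨(PySem.Int.floordiv score 5).toNat - 1, by omega⟩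
    have hTL : tallyList score = List.replicate (k + 1) "e" := by
      unfold tallyList
      rw [if_pos hr, List.append_nil, hk]
    have hlast : PySem.List.pyGet? (List.replicate (k + 1) "e") (-1) = some "e" := by
      rw [PySem.List.pyGet?_neg_one]
      simp [List.getLast?_replicate]
    rw [hTL, if_pos hlast, if_pos hr, hk]
    apply String.toList_inj.mp
    simp only [String.toList_append]
    rw [join_replicate_e k, toList_repStr]
    simp
  · -- answer = replicate q "e" ++ [letter r]; that letter is not "e", no trailing " <br>"
    have h14 : PySem.Int.mod score 5 = 1 ∨ PySem.Int.mod score 5 = 2 ∨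
        PySem.Int.mod score 5 = 3 ∨ PySem.Int.mod score 5 = 4 := by omega
    have hTL : tallyList score = List.replicate (PySem.Int.floordiv score 5).toNat "e" ++
        [tallyLetter (PySem.Int.mod score 5)] := by
      unfold tallyList
      rw [if_neg hr]
    have hletter : tallyLetter (PySem.Int.mod score 5)
        = (((PySem.Str.pyGet? "abcd" (PySem.Int.mod score 5 - 1)).map
            (fun c => String.ofList [c])).getD "") := by
      rcases h14 with h | h | h | h <;> rw [h] <;> decide
    have hne : ¬ (some (tallyLetter (PySem.Int.mod score 5)) = some ("e" : String)) := by
      rcases h14 with h | h | h | h <;> rw [h] <;> decide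
    rw [hTL, PySem.List.pyGet?_neg_one_append_singleton, if_neg hne, if_neg hr]
    apply String.toList_inj.mp
    simp only [String.toList_append]
    rw [join_replicate_e_last (PySem.Int.floordiv score 5).toNat
      (tallyLetter (PySem.Int.mod score 5)), toList_repStr, hletter]
    simp
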